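-- pv_equiv track=rewrite | github.com/alexa-nov/Earthquake-Data | Calcudoku/calcudoku_funcs.py | check_columns_valid
-- ===== SOURCE A (Python) =====
-- def check_column(column):
--     seen_so_far_columns = []
--     for val in column:
--         if val not in seen_so_far_columns:
--             seen_so_far_columns.append(val)
--         elif val == 0:
--             seen_so_far_columns.append(val)
--     if len(seen_so_far_columns) == len(column):
--         return True
--     else:
--         return False
--
-- def check_columns_valid(puzzle):
--     all_columns = [[column[0] for column in puzzle],
--                    [column[1] for column in puzzle],
--                    [column[2] for column in puzzle],
--                    [column[3] for column in puzzle],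
--                    [column[4] for column in puzzle]]
--     for column in all_columns:
--         check_column(column)
--         if check_column(column) == False:
--             return False
--     return True
-- ===== SOURCE B (Python) =====
-- def check_columns_valid(puzzle):
--     cells = [(i, row[i]) for row in puzzle for i in range(5) if row[i] != 0]
--     return len(set(cells)) == len(cells)
-- ===== Notes on version B (the rewrite author's own statement) =====
-- stated objective: alternative
-- what changed: Instead of building and scanning five columns (A's per-column 'seen' membership-append loop with its zero special-case), B flattens the grid in one comprehension into column-tagged nonzero cells (i, row[i]) and performs a single global set/length distinct-count check; correct because duplicate cells share a column tag, so the global check fails exactly when some column has a repeated nonzero value.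
import Mathlib
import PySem

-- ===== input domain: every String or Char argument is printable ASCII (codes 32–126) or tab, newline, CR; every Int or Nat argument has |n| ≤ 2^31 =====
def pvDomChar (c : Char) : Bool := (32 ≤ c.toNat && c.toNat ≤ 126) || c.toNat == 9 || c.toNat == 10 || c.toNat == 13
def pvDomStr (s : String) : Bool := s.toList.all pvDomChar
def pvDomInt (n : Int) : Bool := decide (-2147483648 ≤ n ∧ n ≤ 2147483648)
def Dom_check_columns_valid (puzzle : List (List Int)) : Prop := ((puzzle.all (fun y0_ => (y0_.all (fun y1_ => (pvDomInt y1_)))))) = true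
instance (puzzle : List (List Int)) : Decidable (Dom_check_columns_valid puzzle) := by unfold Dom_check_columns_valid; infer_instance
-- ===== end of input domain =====

-- B drops A's per-column loops entirely: it flattens the grid into column-tagged
-- nonzero cells (i, row[i]) in one comprehension and does a single global
-- distinct-count check; objective: simpler.

-- ===== PORT A =====
-- helper check_column: the 'seen_so_far_columns' loop, then the length comparison
def ccv_step (seen : List Int) (val : Int) : List Int :=
  if !(seen.contains val) then seen ++ [val]
  else if val == 0 then seen ++ [val]
  else seen

def ccv_check_column (column : List Int) : Bool :=
  let seen := column.foldl ccv_step []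
  if seen.length == column.length then true else false

-- the loop 'for column in all_columns: … if check_column(column)==False: return False'
-- (the first, discarded call of check_column is pure and dropped);
-- column[j] is PySem.List.pyGet?; .getD 0 is reached only outside Pre_ (IndexError)
def check_columns_valid (puzzle : List (List Int)) : Bool :=
  let all_columns : List (List Int) :=
    [puzzle.map (fun column => (PySem.List.pyGet? column 0).getD 0),
     puzzle.map (fun column => (PySem.List.pyGet? column 1).getD 0),
     puzzle.map (fun column => (PySem.List.pyGet? column 2).getD 0),
     puzzle.map (fun column => (PySem.List.pyGet? column 3).getD 0),
     puzzle.map (fun column => (PySem.List.pyGet? column 4).getD 0)]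
  all_columns.all (fun column => !(ccv_check_column column == false))

-- ===== PORT B =====
-- row[i] is PySem.List.pyGet?; .getD 0 is reached only outside Pre_ (IndexError)
def check_columns_valid_alt (puzzle : List (List Int)) : Bool :=
  let cells : List (Int × Int) :=
    puzzle.flatMap (fun row =>
      (PySem.List.pyRange 0 5 1).filterMap (fun i =>
        let v := (PySem.List.pyGet? row i).getD 0
        if v ≠ 0 then some (i, v) else none))
  (PySem.Set.ofList cells).length == cells.length

-- ===== PRECONDITION & SPEC =====
-- Pre_ excludes exactly the inputs where the Python A raises IndexError: a row shorter
-- than 5, whose row[0]..row[4] indexing fails (B raises there too).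
def Pre_check_columns_valid (puzzle : List (List Int)) : Prop :=
  ∀ row ∈ puzzle, 5 ≤ row.length
instance (puzzle : List (List Int)) : Decidable (Pre_check_columns_valid puzzle) := by
  unfold Pre_check_columns_valid; infer_instance

def pvWitness_check_columns_valid : List (List Int) :=
  [[1, 2, 3, 4, 5], [2, 3, 4, 5, 1], [3, 4, 5, 1, 2], [4, 5, 1, 2, 3], [5, 1, 2, 3, 4]]

def Spec_check_columns_valid (puzzle : List (List Int)) (out : Bool) : Prop := out = check_columns_valid_alt puzzle
instance (puzzle : List (List Int)) (out : Bool) : Decidable (Spec_check_columns_valid puzzle out) := by unfold Spec_check_columns_valid; infer_instance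

-- ===== CLAIM (what is proved, stated in full; the proofs are below) =====
def Claim_equal_check_columns_valid : Prop := ∀ (puzzle : List (List Int)), Dom_check_columns_valid puzzle → Pre_check_columns_valid puzzle → Spec_check_columns_valid puzzle (check_columns_valid puzzle)

-- ===== LEMMAS AND PROOFS =====

-- the column-tagged nonzero cells of B, and the columns of A, as named abbreviations
def ccv_cells (puzzle : List (List Int)) : List (Int × Int) :=
  puzzle.flatMap (fun row =>
    (PySem.List.pyRange 0 5 1).filterMap (fun i =>
      let v := (PySem.List.pyGet? row i).getD 0
      if v ≠ 0 then some (i, v) else none))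

def ccv_col (i : Int) (puzzle : List (List Int)) : List Int :=
  puzzle.map (fun row => (PySem.List.pyGet? row i).getD 0)

-- set(l) has as many elements as l exactly when l has no duplicates
lemma lenOfList_lt_of_not_nodup {α : Type} [BEq α] [LawfulBEq α] (l : List α) (h : ¬ l.Nodup) :
    (PySem.Set.ofList l).length < l.length := by
  induction l with
  | nil => simp at h
  | cons x xs ih =>
    rw [PySem.Set.ofList_cons]
    by_cases hx : x ∈ xs
    · have hxo : x ∈ PySem.Set.ofList xs := by simpa [PySem.Set.mem_ofList] using hx
      have hlt : ((PySem.Set.ofList xs).discard x).length < (PySem.Set.ofList xs).length := by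
        unfold PySem.Set.discard
        refine List.length_filter_lt_length_iff_exists.mpr ⟨x, hxo, by simp⟩
      have hle := PySem.Set.length_ofList_le xs
      simp only [List.length_cons]
      omega
    · have hxs : ¬ xs.Nodup := by
        intro hn; exact h (List.nodup_cons.mpr ⟨hx, hn⟩)
      have hle : ((PySem.Set.ofList xs).discard x).length ≤ (PySem.Set.ofList xs).length := by
        unfold PySem.Set.discard; exact List.length_filter_le _ _
      have := ih hxs
      simp only [List.length_cons]
      omega

lemma lenOfList_eq_iff {α : Type} [BEq α] [LawfulBEq α] (l : List α) :
    (PySem.Set.ofList l).length = l.length ↔ l.Nodup := by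
  constructor
  · intro h
    by_contra hn
    exact absurd h (Nat.ne_of_lt (lenOfList_lt_of_not_nodup l hn))
  · intro h; rw [PySem.Set.ofList_eq_self_of_nodup l h]

-- each step of A's loop grows 'seen' by at most one element
lemma ccv_step_len_le (seen : List Int) (v : Int) :
    (ccv_step seen v).length ≤ seen.length + 1 := by
  unfold ccv_step; split_ifs <;> simp

lemma ccv_fold_len_le (col : List Int) : ∀ seen : List Int,
    (col.foldl ccv_step seen).length ≤ seen.length + col.length := by
  induction col with
  | nil => intro seen; simp
  | cons v rest ih =>
    intro seen
    have h1 := ccv_step_len_le seen v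
    have h2 := ih (ccv_step seen v)
    simp only [List.foldl_cons, List.length_cons]
    omega

-- A's loop fills 'seen' to full length exactly when the non-zero entries are
-- pairwise distinct and none of them is already in 'seen'
lemma ccv_fold_len_iff (col : List Int) : ∀ seen : List Int,
    ((col.foldl ccv_step seen).length = seen.length + col.length) ↔
      ((col.filter (fun v => v != 0)).Nodup ∧
        ∀ v ∈ col.filter (fun v => v != 0), v ∉ seen) := by
  induction col with
  | nil => intro seen; simp
  | cons v rest ih =>
    intro seen
    simp only [List.foldl_cons, List.length_cons, List.filter_cons]
    by_cases hv : v ∈ seen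
    · by_cases h0 : v = 0
      · subst h0
        have hstep : ccv_step seen 0 = seen ++ [0] := by
          unfold ccv_step; simp [hv]
        rw [hstep]
        have := ih (seen ++ [0])
        simp only [List.length_append, List.length_singleton] at this
        rw [show seen.length + (rest.length + 1) = seen.length + 1 + rest.length by omega,
          this]
        rw [if_neg (by decide)]
        constructor
        · rintro ⟨hn, hm⟩
          exact ⟨hn, fun w hw hws => hm w hw (by simp [hws])⟩
        · rintro ⟨hn, hm⟩
          refine ⟨hn, fun w hw hws => ?_⟩
          rcases List.mem_append.mp hws with h | h
          · exact hm w hw h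
          · have : w ≠ 0 := by simpa using (List.of_mem_filter hw)
            simp at h; exact this h
      · -- v already seen and non-zero: 'seen' does not grow, length can never catch up
        have hstep : ccv_step seen v = seen := by
          unfold ccv_step; simp [hv, h0]
        rw [hstep, if_pos (by simpa using h0)]
        have hle := ccv_fold_len_le rest seen
        constructor
        · intro h; exact absurd h (by omega)
        · rintro ⟨-, hm⟩
          exact (hm v (List.mem_cons_self) hv).elim
    · have hstep : ccv_step seen v = seen ++ [v] := by
        unfold ccv_step; simp [hv]
      rw [hstep]
      have := ih (seen ++ [v])
      simp only [List.length_append, List.length_singleton] at this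
      rw [show seen.length + (rest.length + 1) = seen.length + 1 + rest.length by omega,
        this]
      by_cases h0 : v = 0
      · subst h0
        rw [if_neg (by decide)]
        constructor
        · rintro ⟨hn, hm⟩
          exact ⟨hn, fun w hw hws => hm w hw (by simp [hws])⟩
        · rintro ⟨hn, hm⟩
          refine ⟨hn, fun w hw hws => ?_⟩
          rcases List.mem_append.mp hws with h | h
          · exact hm w hw h
          · have : w ≠ 0 := by simpa using (List.of_mem_filter hw)
            simp at h; exact this h
      · rw [if_pos (by simpa using h0)]
        rw [List.nodup_cons]
        constructor
        · rintro ⟨hn, hm⟩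
          refine ⟨⟨fun hvf => ?_, hn⟩, fun w hw => ?_⟩
          · have := hm v hvf; simp at this
          · rcases List.mem_cons.mp hw with rfl | hw'
            · exact hv
            · intro hws; exact hm w hw' (by simp [hws])
        · rintro ⟨⟨hvn, hn⟩, hm⟩
          refine ⟨hn, fun w hw hws => ?_⟩
          rcases List.mem_append.mp hws with h | h
          · exact hm w (List.mem_cons_of_mem _ hw) h
          · simp at h; subst h; exact hvn hw

-- per-column bridge: A's check_column tests Nodup of the non-zero entries
lemma ccv_check_column_eq_nodup (col : List Int) :
    ccv_check_column col = true ↔ (col.filter (fun v => v != 0)).Nodup := by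
  rw [show ccv_check_column col
      = (if ((List.foldl ccv_step [] col).length == col.length) = true then true else false)
    from rfl]
  have h := ccv_fold_len_iff col []
  simp only [List.length_nil, Nat.zero_add, List.not_mem_nil, not_false_iff,
    imp_true_iff, and_true] at h
  split_ifs with hc
  · simp only [true_iff]
    exact h.mp (by simpa using hc)
  · simp only [false_iff]
    intro hn
    exact hc (by simp [h.mpr hn])

lemma pyRange05 : PySem.List.pyRange 0 5 1 = [0, 1, 2, 3, 4] := by decide

-- a list of pairs has no duplicates iff each key-fiber has none
lemma nodup_iff_fibers (l : List (Int × Int)) :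
    l.Nodup ↔ ∀ k : Int, (l.filter (fun p => p.1 == k)).Nodup := by
  constructor
  · intro h k; exact h.filter _
  · intro h
    rw [List.nodup_iff_count_le_one]
    intro p
    have := List.nodup_iff_count_le_one.mp (h p.1) p
    rwa [List.count_filter (by simp)] at this

-- filtering the tagged cells by key commutes with the index filterMap
lemma filter_key_filterMap (v : Int → Int) (i : Int) (js : List Int) :
    ((js.filterMap (fun j => if v j ≠ 0 then some (j, v j) else none)).filter
        (fun p => p.1 == i))
      = (js.filter (fun j => j == i)).filterMap
          (fun j => if v j ≠ 0 then some (j, v j) else none) := by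
  induction js with
  | nil => simp
  | cons j rest ih =>
    simp only [ne_eq, ite_not] at ih ⊢
    by_cases hj : j = i
    · subst hj
      by_cases hv : v j = 0 <;> simp [hv, ih]
    · by_cases hv : v j = 0 <;> simp [hv, hj, ih]

-- the fiber of the cells at a column index i ∈ 0..4 is that column's non-zero entries
lemma ccv_fiber_eq (puzzle : List (List Int)) (i : Int)
    (hi : i ∈ ([0, 1, 2, 3, 4] : List Int)) :
    (ccv_cells puzzle).filter (fun p => p.1 == i)
      = ((ccv_col i puzzle).filter (fun v => v != 0)).map (fun v => (i, v)) := by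
  induction puzzle with
  | nil => simp [ccv_cells, ccv_col]
  | cons row rest ih =>
    simp only [ccv_cells, ccv_col, List.flatMap_cons, List.map_cons, List.filter_cons,
      List.filter_append] at *
    rw [ih, pyRange05, filter_key_filterMap (fun j => (PySem.List.pyGet? row j).getD 0) i]
    have hsingle : ([0, 1, 2, 3, 4] : List Int).filter (fun j => j == i) = [i] := by
      fin_cases hi <;> decide
    rw [hsingle]
    by_cases hv : (PySem.List.pyGet? row i).getD 0 ≠ 0 <;>
      simp [hv]

-- every cell's key lies in 0..4, so other fibers are empty
lemma ccv_fiber_empty (puzzle : List (List Int)) (k : Int)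
    (hk : k ∉ ([0, 1, 2, 3, 4] : List Int)) :
    (ccv_cells puzzle).filter (fun p => p.1 == k) = [] := by
  rw [List.filter_eq_nil_iff]
  intro p hp
  simp only [ccv_cells, List.mem_flatMap, pyRange05, List.mem_filterMap] at hp
  obtain ⟨row, -, j, hj, hpj⟩ := hp
  split at hpj
  · cases hpj
    simp only [beq_iff_eq]
    intro h; exact hk (h ▸ hj)
  · cases hpj

-- B is true iff every column's non-zero entries are duplicate-free
lemma alt_iff_cols (puzzle : List (List Int)) :
    check_columns_valid_alt puzzle = true ↔
      ∀ i ∈ ([0, 1, 2, 3, 4] : List Int),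
        ((ccv_col i puzzle).filter (fun v => v != 0)).Nodup := by
  unfold check_columns_valid_alt
  rw [show (puzzle.flatMap (fun row =>
      (PySem.List.pyRange 0 5 1).filterMap (fun i =>
        let v := (PySem.List.pyGet? row i).getD 0
        if v ≠ 0 then some (i, v) else none))) = ccv_cells puzzle from rfl]
  rw [beq_iff_eq, lenOfList_eq_iff, nodup_iff_fibers]
  constructor
  · intro h i hi
    have := h i
    rw [ccv_fiber_eq puzzle i hi] at this
    exact this.of_map
  · intro h k
    by_cases hk : k ∈ ([0, 1, 2, 3, 4] : List Int)
    · rw [ccv_fiber_eq puzzle k hk]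
      exact (h k hk).map (fun a b hab => by simpa using hab)
    · rw [ccv_fiber_empty puzzle k hk]; exact List.nodup_nil

-- A is true iff every column's non-zero entries are duplicate-free
lemma a_iff_cols (puzzle : List (List Int)) :
    check_columns_valid puzzle = true ↔
      ∀ i ∈ ([0, 1, 2, 3, 4] : List Int),
        ((ccv_col i puzzle).filter (fun v => v != 0)).Nodup := by
  unfold check_columns_valid
  simp only [List.all_cons, List.all_nil, Bool.and_true, Bool.and_eq_true,
    Bool.not_eq_eq_eq_not, Bool.not_true, beq_eq_false_iff_ne, ne_eq, Bool.not_eq_false,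
    ccv_check_column_eq_nodup]
  constructor
  · rintro ⟨h0, h1, h2, h3, h4⟩ i hi
    fin_cases hi <;> simpa [ccv_col]
  · intro h
    exact ⟨by simpa [ccv_col] using h 0 (by decide), by simpa [ccv_col] using h 1 (by decide),
      by simpa [ccv_col] using h 2 (by decide), by simpa [ccv_col] using h 3 (by decide),
      by simpa [ccv_col] using h 4 (by decide)⟩

-- ===== VERDICT (by name: the statement is the Claim_ definition above) =====
theorem check_columns_valid_spec : Claim_equal_check_columns_valid := by
  intro puzzle _ _
  unfold Spec_check_columns_valid
  rw [Bool.eq_iff_iff, a_iff_cols, alt_iff_cols]
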